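-- pv_equiv track=rewrite | github.com/janfpl/KLBLuxendo | python_gui/klb_codec.py | iter_blocks
-- ===== SOURCE A (Python) =====
-- import math
-- from typing import Callable, Iterable, Iterator, Sequence
--
-- KLB_DATA_DIMS = 5
--
-- def iter_blocks(
--     xyzct: Sequence[int],
--     block_size: Sequence[int],
-- ) -> Iterator[tuple[int, tuple[int, int, int, int, int], tuple[int, int, int, int, int]]]:
--     xyzct_5d = _normalise_xyzct(xyzct)
--     block_size_5d = _normalise_block_size(block_size, xyzct_5d)
--     total = math.prod(_ceil_div(dim, block) for dim, block in zip(xyzct_5d, block_size_5d))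
--     for block_id in range(total):
--         yield block_by_id(xyzct_5d, block_size_5d, block_id)
--
-- def block_by_id(
--     xyzct: Sequence[int],
--     block_size: Sequence[int],
--     block_id: int,
-- ) -> tuple[int, tuple[int, int, int, int, int], tuple[int, int, int, int, int]]:
--     xyzct_5d = _normalise_xyzct(xyzct)
--     block_size_5d = _normalise_block_size(block_size, xyzct_5d)
--     counts = tuple(_ceil_div(dim, block) for dim, block in zip(xyzct_5d, block_size_5d))
--     if block_id < 0 or block_id >= math.prod(counts):
--         raise IndexError(block_id)
--     remaining = int(block_id)
--     start: list[int] = []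
--     size: list[int] = []
--     for dim, block, count in zip(xyzct_5d, block_size_5d, counts):
--         coord = remaining % count
--         remaining //= count
--         first = coord * block
--         last = min(first + block, dim)
--         start.append(first)
--         size.append(last - first)
--     return block_id, tuple(start), tuple(size)  # type: ignore[return-value]
--
-- def _normalise_xyzct(values: Sequence[int]) -> tuple[int, int, int, int, int]:
--     if len(values) == 3:
--         values = (*values, 1, 1)
--     if len(values) != KLB_DATA_DIMS:
--         raise ValueError("Expected xyzct as 3 or 5 integer values")
--     parsed = tuple(int(v) for v in values)
--     if any(v <= 0 for v in parsed):
--         raise ValueError(f"Dimensions must be positive: {parsed}")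
--     return parsed  # type: ignore[return-value]
--
-- def _normalise_block_size(values: Sequence[int], xyzct: Sequence[int]) -> tuple[int, int, int, int, int]:
--     if len(values) == 3:
--         values = (*values, 1, 1)
--     if len(values) != KLB_DATA_DIMS:
--         raise ValueError("Expected block size as 3 or 5 integer values")
--     dims = _normalise_xyzct(xyzct)
--     return tuple(max(1, min(int(v), dim)) for v, dim in zip(values, dims))  # type: ignore[return-value]
--
-- def _ceil_div(a: int, b: int) -> int:
--     return (int(a) + int(b) - 1) // int(b)
-- ===== SOURCE B (Python) =====
-- # Direct grid iteration: precompute per-dimension (start, size) tables, then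
-- # nested loops with the first dimension varying fastest and a running counter,
-- # instead of decoding each block_id with % and // .
--
-- def _dims5(values):
--     vals = [int(v) for v in values]
--     if len(vals) == 3:
--         vals += [1, 1]
--     if len(vals) != 5:
--         raise ValueError("Expected xyzct as 3 or 5 integer values")
--     if any(v <= 0 for v in vals):
--         raise ValueError(f"Dimensions must be positive: {tuple(vals)}")
--     return vals
--
-- def iter_blocks(xyzct, block_size):
--     dims = _dims5(xyzct)
--     raw = [int(v) for v in block_size]
--     if len(raw) == 3:
--         raw += [1, 1]
--     if len(raw) != 5:
--         raise ValueError("Expected block size as 3 or 5 integer values")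
--     bs = [max(1, min(v, d)) for v, d in zip(raw, dims)]
--     # per-dimension tables of (start, size)
--     tbl = [[(c * b, min(c * b + b, d) - c * b) for c in range(-(-d // b))]
--            for d, b in zip(dims, bs)]
--     pairs = []
--     for s4 in tbl[4]:
--         for s3 in tbl[3]:
--             for s2 in tbl[2]:
--                 for s1 in tbl[1]:
--                     for s0 in tbl[0]:
--                         pairs.append(((s0[0], s1[0], s2[0], s3[0], s4[0]),
--                                       (s0[1], s1[1], s2[1], s3[1], s4[1])))
--     for block_id, (start, size) in enumerate(pairs):
--         yield block_id, start, size
-- ===== Notes on version B (the rewrite author's own statement) =====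
-- stated objective: alternative
-- what changed: Replaces per-block-id modular odometer decoding (block_by_id with % and //) by direct grid iteration: per-dimension (start,size) tables built once, five nested loops with the first dimension varying fastest, and enumerate for the running block id.
import Mathlib
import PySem

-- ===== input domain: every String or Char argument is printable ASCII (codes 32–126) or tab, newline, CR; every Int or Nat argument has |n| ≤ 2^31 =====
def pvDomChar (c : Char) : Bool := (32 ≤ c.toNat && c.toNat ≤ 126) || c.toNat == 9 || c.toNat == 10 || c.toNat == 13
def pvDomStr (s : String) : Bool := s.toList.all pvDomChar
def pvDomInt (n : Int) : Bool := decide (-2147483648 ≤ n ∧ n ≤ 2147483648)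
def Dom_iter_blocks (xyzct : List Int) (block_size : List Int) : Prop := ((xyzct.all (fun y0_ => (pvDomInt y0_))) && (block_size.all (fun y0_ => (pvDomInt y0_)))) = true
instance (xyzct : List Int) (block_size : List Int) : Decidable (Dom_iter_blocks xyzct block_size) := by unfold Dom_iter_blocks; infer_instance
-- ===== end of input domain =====

-- B replaces A's "decode each block_id with % and //" by direct grid iteration over
-- precomputed per-dimension (start,size) tables, numbering blocks with enumerate.

-- ===== PORT A =====
def pvCeilDiv (a b : Int) : Int := PySem.Int.floordiv (a + b - 1) b

-- _normalise_xyzct; none = the ValueError paths (excluded by Pre_)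
def pvNormXyzct? (values : List Int) : Option (List Int) :=
  let values := if values.length = 3 then values ++ [1, 1] else values
  if values.length ≠ 5 then none
  else if values.any (fun v => decide (v ≤ 0)) then none
  else some values

-- _normalise_block_size
def pvNormBlockSize? (values : List Int) (xyzct : List Int) : Option (List Int) :=
  let values := if values.length = 3 then values ++ [1, 1] else values
  if values.length ≠ 5 then none
  else match pvNormXyzct? xyzct with
    | none => none
    | some dims => some (List.zipWith (fun v dim => max 1 (min v dim)) values dims)

def pvTo5 (l : List Int) : Int × Int × Int × Int × Int :=
  match l with
  | [a, b, c, d, e] => (a, b, c, d, e)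
  | _ => (0, 0, 0, 0, 0)

-- block_by_id (as called by iter_blocks; junk on the raise paths, excluded by Pre_ / range)
def pvBlockById (xyzct : List Int) (block_size : List Int) (block_id : Int) :
    Int × (Int × Int × Int × Int × Int) × (Int × Int × Int × Int × Int) :=
  match pvNormXyzct? xyzct with
  | none => (0, (0,0,0,0,0), (0,0,0,0,0))
  | some dims =>
    match pvNormBlockSize? block_size dims with
    | none => (0, (0,0,0,0,0), (0,0,0,0,0))
    | some bs =>
      let counts := List.zipWith pvCeilDiv dims bs
      if block_id < 0 ∨ counts.prod ≤ block_id then (0, (0,0,0,0,0), (0,0,0,0,0))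
      else
        let st := (List.zip dims (List.zip bs counts)).foldl
          (fun (acc : Int × List Int × List Int) t =>
            let coord := PySem.Int.mod acc.1 t.2.2
            let remaining := PySem.Int.floordiv acc.1 t.2.2
            let first := coord * t.2.1
            let last := min (first + t.2.1) t.1
            (remaining, acc.2.1 ++ [first], acc.2.2 ++ [last - first]))
          (block_id, ([] : List Int), ([] : List Int))
        (block_id, pvTo5 st.2.1, pvTo5 st.2.2)

def iter_blocks (xyzct : List Int) (block_size : List Int) :
    List (Int × (Int × Int × Int × Int × Int) × (Int × Int × Int × Int × Int)) :=
  match pvNormXyzct? xyzct with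
  | none => []
  | some xyzct_5d =>
    match pvNormBlockSize? block_size xyzct_5d with
    | none => []
    | some block_size_5d =>
      let total := (List.zipWith pvCeilDiv xyzct_5d block_size_5d).prod
      (PySem.List.pyRange 0 total 1).map (fun block_id => pvBlockById xyzct_5d block_size_5d block_id)

-- ===== PORT B =====
-- _dims5; none = the ValueError paths
def pvDims5? (values : List Int) : Option (List Int) :=
  let vals := if values.length = 3 then values ++ [1, 1] else values
  if vals.length ≠ 5 then none
  else if vals.any (fun v => decide (v ≤ 0)) then none
  else some vals

def iter_blocks_alt (xyzct : List Int) (block_size : List Int) :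
    List (Int × (Int × Int × Int × Int × Int) × (Int × Int × Int × Int × Int)) :=
  match pvDims5? xyzct with
  | none => []
  | some dims =>
    let raw := if block_size.length = 3 then block_size ++ [1, 1] else block_size
    if raw.length ≠ 5 then []
    else
      let bs := List.zipWith (fun v d => max 1 (min v d)) raw dims
      let tbl := List.zipWith (fun d b =>
          (PySem.List.pyRange 0 (-(PySem.Int.floordiv (-d) b)) 1).map
            (fun c => (c * b, min (c * b + b) d - c * b))) dims bs
      match tbl with
      | [t0, t1, t2, t3, t4] =>
        let pairs := t4.flatMap (fun s4 => t3.flatMap (fun s3 => t2.flatMap (fun s2 =>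
          t1.flatMap (fun s1 => t0.map (fun s0 =>
            ((s0.1, s1.1, s2.1, s3.1, s4.1), (s0.2, s1.2, s2.2, s3.2, s4.2)))))))
        PySem.List.enumerate pairs 0
      | _ => []

-- ===== PRECONDITION & SPEC =====
-- Pre_ excludes exactly the ValueError raises of A: a length other than 3 or 5
-- for either argument, or a non-positive dimension.
def Pre_iter_blocks (xyzct : List Int) (block_size : List Int) : Prop :=
  (xyzct.length = 3 ∨ xyzct.length = 5) ∧ (∀ v ∈ xyzct, 0 < v) ∧
  (block_size.length = 3 ∨ block_size.length = 5)
instance (xyzct : List Int) (block_size : List Int) : Decidable (Pre_iter_blocks xyzct block_size) := by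
  unfold Pre_iter_blocks; infer_instance

def pvWitness_iter_blocks : List Int × List Int := ([5, 3, 2], [2, 2, 1, 1, 1])

def Spec_iter_blocks (xyzct : List Int) (block_size : List Int) (out : List (Int × (Int × Int × Int × Int × Int) × (Int × Int × Int × Int × Int))) : Prop := out = iter_blocks_alt xyzct block_size
def pvDecEqT : DecidableEq (Int × (Int × Int × Int × Int × Int) × (Int × Int × Int × Int × Int)) :=
  fun a b => instDecidableEqProd a b
instance (xyzct : List Int) (block_size : List Int) (out : List (Int × (Int × Int × Int × Int × Int) × (Int × Int × Int × Int × Int))) : Decidable (Spec_iter_blocks xyzct block_size out) := by unfold Spec_iter_blocks; exact @List.hasDecEq _ pvDecEqT _ _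

-- ===== CLAIM (what is proved, stated in full; the proofs are below) =====
def Claim_equal_iter_blocks : Prop := ∀ (xyzct : List Int) (block_size : List Int), Dom_iter_blocks xyzct block_size → Pre_iter_blocks xyzct block_size → Spec_iter_blocks xyzct block_size (iter_blocks xyzct block_size)

-- ===== LEMMAS AND PROOFS =====

lemma peelF {α : Type} (c : Int) (n : Nat) (hc : 0 < c) (h : Int → Int → List α) :
    (PySem.List.pyRange 0 (c * n) 1).flatMap
        (fun id => h (PySem.Int.mod id c) (PySem.Int.floordiv id c))
      = (PySem.List.pyRange 0 n 1).flatMap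
          (fun q => (PySem.List.pyRange 0 c 1).flatMap (fun j => h j q)) := by
  induction n with
  | zero => simp [PySem.List.pyRange_one_eq_nil]
  | succ n ih =>
    have e : c * ((n : Int) + 1) = c * n + c := by ring
    push_cast
    rw [e, PySem.List.pyRange_one_append 0 (c * n) (c * n + c) (by positivity) (by omega),
        List.flatMap_append, ih, PySem.List.pyRange_one_succ_right (by positivity),
        List.flatMap_append]
    congr 1
    rw [PySem.List.pyRange_one (c * n) (c * n + c), PySem.List.pyRange_one 0 c]
    have e2 : (c * n + c - c * n) = c := by ring
    rw [e2]
    simp only [List.flatMap_singleton, List.flatMap_map]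
    rw [sub_zero]
    refine List.flatMap_congr (fun k hk => ?_)
    have hk' : (k : Int) < c := by
      have := List.mem_range.mp hk
      omega
    have hk0 : (0 : Int) ≤ (k : Int) := by positivity
    have hm : PySem.Int.mod (c * n + k) c = (0 : Int) + k := by
      rw [PySem.Int.mod_eq_emod_of_pos hc, add_comm, Int.add_mul_emod_self_left,
          Int.emod_eq_of_lt hk0 hk', zero_add]
    have hd : PySem.Int.floordiv (c * n + k) c = (n : Int) := by
      rw [PySem.Int.floordiv_eq_ediv_of_pos hc, add_comm,
          Int.add_mul_ediv_left _ _ (by omega : c ≠ 0), Int.ediv_eq_zero_of_lt hk0 hk', zero_add]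
    rw [hm, hd]

lemma peelF' {α : Type} (c P : Int) (hc : 0 < c) (hP : 0 ≤ P) (h : Int → Int → List α) :
    (PySem.List.pyRange 0 (c * P) 1).flatMap
        (fun id => h (PySem.Int.mod id c) (PySem.Int.floordiv id c))
      = (PySem.List.pyRange 0 P 1).flatMap
          (fun q => (PySem.List.pyRange 0 c 1).flatMap (fun j => h j q)) := by
  obtain ⟨n, rfl⟩ := Int.eq_ofNat_of_zero_le hP
  exact peelF c n hc h

lemma peelM' {α : Type} (c P : Int) (hc : 0 < c) (hP : 0 ≤ P) (h : Int → Int → α) :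
    (PySem.List.pyRange 0 (c * P) 1).map
        (fun id => h (PySem.Int.mod id c) (PySem.Int.floordiv id c))
      = (PySem.List.pyRange 0 P 1).flatMap
          (fun q => (PySem.List.pyRange 0 c 1).map (fun j => h j q)) := by
  have := peelF' c P hc hP (fun j q => [h j q])
  simpa [← List.map_eq_flatMap] using this

lemma grid5 {α : Type} (c0 c1 c2 c3 c4 : Int)
    (h0 : 0 < c0) (h1 : 0 < c1) (h2 : 0 < c2) (h3 : 0 < c3) (h4 : 0 < c4)
    (F : Int → Int → Int → Int → Int → α) :
    (PySem.List.pyRange 0 (c0 * (c1 * (c2 * (c3 * (c4 * 1))))) 1).map (fun id =>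
        F (PySem.Int.mod id c0)
          (PySem.Int.mod (PySem.Int.floordiv id c0) c1)
          (PySem.Int.mod (PySem.Int.floordiv (PySem.Int.floordiv id c0) c1) c2)
          (PySem.Int.mod (PySem.Int.floordiv (PySem.Int.floordiv (PySem.Int.floordiv id c0) c1) c2) c3)
          (PySem.Int.mod (PySem.Int.floordiv (PySem.Int.floordiv (PySem.Int.floordiv (PySem.Int.floordiv id c0) c1) c2) c3) c4))
      = (PySem.List.pyRange 0 c4 1).flatMap (fun j4 =>
          (PySem.List.pyRange 0 c3 1).flatMap (fun j3 =>
            (PySem.List.pyRange 0 c2 1).flatMap (fun j2 =>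
              (PySem.List.pyRange 0 c1 1).flatMap (fun j1 =>
                (PySem.List.pyRange 0 c0 1).map (fun j0 => F j0 j1 j2 j3 j4))))) := by
  rw [peelM' c0 (c1 * (c2 * (c3 * (c4 * 1)))) h0 (by positivity)
        (fun a b => F a (PySem.Int.mod b c1)
          (PySem.Int.mod (PySem.Int.floordiv b c1) c2)
          (PySem.Int.mod (PySem.Int.floordiv (PySem.Int.floordiv b c1) c2) c3)
          (PySem.Int.mod (PySem.Int.floordiv (PySem.Int.floordiv (PySem.Int.floordiv b c1) c2) c3) c4)),
      peelF' c1 (c2 * (c3 * (c4 * 1))) h1 (by positivity)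
        (fun a b => (PySem.List.pyRange 0 c0 1).map (fun j0 => F j0 a (PySem.Int.mod b c2)
          (PySem.Int.mod (PySem.Int.floordiv b c2) c3)
          (PySem.Int.mod (PySem.Int.floordiv (PySem.Int.floordiv b c2) c3) c4))),
      peelF' c2 (c3 * (c4 * 1)) h2 (by positivity)
        (fun a b => (PySem.List.pyRange 0 c1 1).flatMap (fun j1 =>
          (PySem.List.pyRange 0 c0 1).map (fun j0 => F j0 j1 a (PySem.Int.mod b c3)
            (PySem.Int.mod (PySem.Int.floordiv b c3) c4)))),
      peelF' c3 (c4 * 1) h3 (by positivity)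
        (fun a b => (PySem.List.pyRange 0 c2 1).flatMap (fun j2 =>
          (PySem.List.pyRange 0 c1 1).flatMap (fun j1 =>
            (PySem.List.pyRange 0 c0 1).map (fun j0 => F j0 j1 j2 a (PySem.Int.mod b c4))))),
      peelF' c4 1 h4 (by omega)
        (fun a _b => (PySem.List.pyRange 0 c3 1).flatMap (fun j3 =>
          (PySem.List.pyRange 0 c2 1).flatMap (fun j2 =>
            (PySem.List.pyRange 0 c1 1).flatMap (fun j1 =>
              (PySem.List.pyRange 0 c0 1).map (fun j0 => F j0 j1 j2 j3 a)))))]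
  have e : PySem.List.pyRange 0 1 1 = [0] := by
    have := PySem.List.pyRange_one_singleton (a := (0 : Int)); simpa using this
  rw [e]
  simp


lemma ceil_pos (d b : Int) (hd : 0 < d) (hb : 0 < b) : 0 < pvCeilDiv d b := by
  unfold pvCeilDiv
  have h := (PySem.Int.le_floordiv_iff_mul_le (a := d + b - 1) (b := b) (q := 1) hb).mpr (by omega)
  omega

lemma ceil_neg (d b : Int) (hb : 0 < b) :
    -(PySem.Int.floordiv (-d) b) = pvCeilDiv d b := by
  unfold pvCeilDiv
  have h := (PySem.Int.floordiv_eq_iff_of_pos (a := d + b - 1) (b := b)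
      (q := PySem.Int.floordiv (d + b - 1) b) hb).mp rfl
  rw [PySem.Int.neg_floordiv_neg_eq_iff_of_pos hb]
  constructor <;> nlinarith [h.1, h.2]

lemma ceil_neg_ediv (d b : Int) (hb : 0 < b) : -(-d / b) = pvCeilDiv d b := by
  rw [← ceil_neg d b hb, PySem.Int.floordiv_eq_ediv_of_pos hb]

lemma core (d0 d1 d2 d3 d4 r0 r1 r2 r3 r4 : Int)
    (hd0 : 0 < d0) (hd1 : 0 < d1) (hd2 : 0 < d2) (hd3 : 0 < d3) (hd4 : 0 < d4) :
    iter_blocks [d0, d1, d2, d3, d4] [r0, r1, r2, r3, r4]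
      = iter_blocks_alt [d0, d1, d2, d3, d4] [r0, r1, r2, r3, r4] := by
  have hA1 : pvNormXyzct? [d0, d1, d2, d3, d4] = some [d0, d1, d2, d3, d4] := by
    simp [pvNormXyzct?]; omega
  have hA2 : pvNormBlockSize? [r0, r1, r2, r3, r4] [d0, d1, d2, d3, d4]
      = some [max 1 (min r0 d0), max 1 (min r1 d1), max 1 (min r2 d2),
              max 1 (min r3 d3), max 1 (min r4 d4)] := by
    simp [pvNormBlockSize?, hA1]
  have hB1 : pvDims5? [d0, d1, d2, d3, d4] = some [d0, d1, d2, d3, d4] := by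
    simp [pvDims5?]; omega
  simp only [iter_blocks, iter_blocks_alt, hA1, hA2, hB1]
  norm_num
  rw [ceil_neg_ediv d0 _ (by omega : (0:Int) < max 1 (min r0 d0)),
      ceil_neg_ediv d1 _ (by omega : (0:Int) < max 1 (min r1 d1)),
      ceil_neg_ediv d2 _ (by omega : (0:Int) < max 1 (min r2 d2)),
      ceil_neg_ediv d3 _ (by omega : (0:Int) < max 1 (min r3 d3)),
      ceil_neg_ediv d4 _ (by omega : (0:Int) < max 1 (min r4 d4))]
  simp only [List.flatMap_map, Function.comp_def]
  rw [← grid5 (pvCeilDiv d0 (max 1 (min r0 d0))) (pvCeilDiv d1 (max 1 (min r1 d1))) (pvCeilDiv d2 (max 1 (min r2 d2))) (pvCeilDiv d3 (max 1 (min r3 d3))) (pvCeilDiv d4 (max 1 (min r4 d4))) (ceil_pos d0 (max 1 (min r0 d0)) hd0 (by omega)) (ceil_pos d1 (max 1 (min r1 d1)) hd1 (by omega)) (ceil_pos d2 (max 1 (min r2 d2)) hd2 (by omega)) (ceil_pos d3 (max 1 (min r3 d3)) hd3 (by omega)) (ceil_pos d4 (max 1 (min r4 d4)) hd4 (by ome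ga))
      (fun j0 j1 j2 j3 j4 => ((j0 * (max 1 (min r0 d0)), j1 * (max 1 (min r1 d1)), j2 * (max 1 (min r2 d2)), j3 * (max 1 (min r3 d3)), j4 * (max 1 (min r4 d4))), min (j0 * (max 1 (min r0 d0)) + (max 1 (min r0 d0))) d0 - j0 * (max 1 (min r0 d0)), min (j1 * (max 1 (min r1 d1)) + (max 1 (min r1 d1))) d1 - j1 * (max 1 (min r1 d1)), min (j2 * (max 1 (min r2 d2)) + (max 1 (min r2 d2))) d2 - j2 * (max 1 (min r2 d2)), min (j3 * (max 1 (min r3 d3)) + (max 1 (min r3 d3))) d3 - j3 * (max 1 (min r3 d3)), min (j4 * (max 1 (min r4 d4)) + (max 1 (min r4 d4))) d4 - j4 * (max 1 (min r4 d4))))]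
  rw [show (pvCeilDiv d0 (max 1 (min r0 d0))) * ((pvCeilDiv d1 (max 1 (min r1 d1))) * ((pvCeilDiv d2 (max 1 (min r2 d2))) * ((pvCeilDiv d3 (max 1 (min r3 d3))) * ((pvCeilDiv d4 (max 1 (min r4 d4))) * 1)))) = ((pvCeilDiv d0 (max 1 (min r0 d0))) * ((pvCeilDiv d1 (max 1 (min r1 d1))) * ((pvCeilDiv d2 (max 1 (min r2 d2))) * ((pvCeilDiv d3 (max 1 (min r3 d3))) * (pvCeilDiv d4 (max 1 (min r4 d4))))))) from by ring]
  rw [PySem.List.enumerate_eq_map_pyRange (d := (((0,0,0,0,0),(0,0,0,0,0)) :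
        (Int × Int × Int × Int × Int) × (Int × Int × Int × Int × Int)))]
  have hc0 : 0 < (pvCeilDiv d0 (max 1 (min r0 d0))) := ceil_pos d0 (max 1 (min r0 d0)) hd0 (by omega)
  have hc1 : 0 < (pvCeilDiv d1 (max 1 (min r1 d1))) := ceil_pos d1 (max 1 (min r1 d1)) hd1 (by omega)
  have hc2 : 0 < (pvCeilDiv d2 (max 1 (min r2 d2))) := ceil_pos d2 (max 1 (min r2 d2)) hd2 (by omega)
  have hc3 : 0 < (pvCeilDiv d3 (max 1 (min r3 d3))) := ceil_pos d3 (max 1 (min r3 d3)) hd3 (by omega)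
  have hc4 : 0 < (pvCeilDiv d4 (max 1 (min r4 d4))) := ceil_pos d4 (max 1 (min r4 d4)) hd4 (by omega)
  have hT : (0:Int) < ((pvCeilDiv d0 (max 1 (min r0 d0))) * ((pvCeilDiv d1 (max 1 (min r1 d1))) * ((pvCeilDiv d2 (max 1 (min r2 d2))) * ((pvCeilDiv d3 (max 1 (min r3 d3))) * (pvCeilDiv d4 (max 1 (min r4 d4))))))) := by positivity
  simp only [PySem.List.len_eq, List.length_map, PySem.List.length_pyRange_one]
  rw [show (((((pvCeilDiv d0 (max 1 (min r0 d0))) * ((pvCeilDiv d1 (max 1 (min r1 d1))) * ((pvCeilDiv d2 (max 1 (min r2 d2))) * ((pvCeilDiv d3 (max 1 (min r3 d3))) * (pvCeilDiv d4 (max 1 (min r4 d4))))))) - 0).toNat : Int)) = ((pvCeilDiv d0 (max 1 (min r0 d0))) * ((pvCeilDiv d1 (max 1 (min r1 d1))) * ((pvCeilDiv d2 (max 1 (min r2 d2))) * ((pvCeilDiv d3 (max 1 (min r3 d3))) * (pvCeilDiv d4 (max 1 (min r4 d4))))))) from by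
    rw [sub_zero, Int.toNat_of_nonneg (le_of_lt hT)]]
  have hA2' : pvNormBlockSize? [(max 1 (min r0 d0)), (max 1 (min r1 d1)), (max 1 (min r2 d2)), (max 1 (min r3 d3)), (max 1 (min r4 d4))] [d0, d1, d2, d3, d4]
      = some [(max 1 (min r0 d0)), (max 1 (min r1 d1)), (max 1 (min r2 d2)), (max 1 (min r3 d3)), (max 1 (min r4 d4))] := by
    simp [pvNormBlockSize?, hA1]
    omega
  refine List.map_congr_left (fun id hid => ?_)
  obtain ⟨hid0, hidT⟩ := (PySem.List.mem_pyRange_one).mp hid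
  rw [PySem.List.pyGetD_map_pyRange_of_nonneg _ _ _ _ hid0 hidT]
  simp only [pvBlockById, hA1, hA2', List.zipWith_cons_cons, List.zipWith_nil_right]
  rw [if_neg (by simp only [List.prod_cons, List.prod_nil, mul_one]; omega)]
  simp only [List.zip_cons_cons, List.zip_nil_right, List.foldl_cons, List.foldl_nil,
    List.nil_append, List.cons_append, pvTo5]

lemma len5 {α : Type} (l : List α) (h : l.length = 5) :
    ∃ a b c d e, l = [a, b, c, d, e] := by
  match l, h with
  | [a, b, c, d, e], _ => exact ⟨a, b, c, d, e, rfl⟩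

lemma len3 {α : Type} (l : List α) (h : l.length = 3) :
    ∃ a b c, l = [a, b, c] := by
  match l, h with
  | [a, b, c], _ => exact ⟨a, b, c, rfl⟩

lemma padA (x0 x1 x2 : Int) (s : List Int) :
    iter_blocks [x0, x1, x2] s = iter_blocks [x0, x1, x2, 1, 1] s := by
  simp [iter_blocks, pvNormXyzct?]

lemma padA_bs (xs : List Int) (s0 s1 s2 : Int) :
    iter_blocks xs [s0, s1, s2] = iter_blocks xs [s0, s1, s2, 1, 1] := by
  rcases h : pvNormXyzct? xs with _ | d
  · simp [iter_blocks, h]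
  · simp only [iter_blocks, h]
    rw [show pvNormBlockSize? [s0, s1, s2] d = pvNormBlockSize? [s0, s1, s2, 1, 1] d from by
      simp [pvNormBlockSize?]]

lemma padB (x0 x1 x2 : Int) (s : List Int) :
    iter_blocks_alt [x0, x1, x2] s = iter_blocks_alt [x0, x1, x2, 1, 1] s := by
  simp [iter_blocks_alt, pvDims5?]

lemma padB_bs (xs : List Int) (s0 s1 s2 : Int) :
    iter_blocks_alt xs [s0, s1, s2] = iter_blocks_alt xs [s0, s1, s2, 1, 1] := by
  simp [iter_blocks_alt]

theorem final : ∀ (xyzct : List Int) (block_size : List Int),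
    (xyzct.length = 3 ∨ xyzct.length = 5) → (∀ v ∈ xyzct, 0 < v) →
    (block_size.length = 3 ∨ block_size.length = 5) →
    iter_blocks xyzct block_size = iter_blocks_alt xyzct block_size := by
  intro xyzct bsz hlx hpos hls
  have step : ∀ (ds : List Int), ds.length = 5 → (∀ v ∈ ds, 0 < v) →
      iter_blocks ds bsz = iter_blocks_alt ds bsz := by
    intro ds hlen hdp
    obtain ⟨d0, d1, d2, d3, d4, rfl⟩ := len5 ds hlen
    have hd0 : 0 < d0 := hdp _ (by simp)
    have hd1 : 0 < d1 := hdp _ (by simp)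
    have hd2 : 0 < d2 := hdp _ (by simp)
    have hd3 : 0 < d3 := hdp _ (by simp)
    have hd4 : 0 < d4 := hdp _ (by simp)
    rcases hls with h3 | h5
    · obtain ⟨s0, s1, s2, rfl⟩ := len3 bsz h3
      rw [padA_bs, padB_bs]
      exact core d0 d1 d2 d3 d4 s0 s1 s2 1 1 hd0 hd1 hd2 hd3 hd4
    · obtain ⟨s0, s1, s2, s3, s4, rfl⟩ := len5 bsz h5
      exact core d0 d1 d2 d3 d4 s0 s1 s2 s3 s4 hd0 hd1 hd2 hd3 hd4
  rcases hlx with h3 | h5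
  · obtain ⟨x0, x1, x2, rfl⟩ := len3 xyzct h3
    rw [padA, padB]
    exact step [x0, x1, x2, 1, 1] rfl (by
      intro v hv
      have h0 : 0 < x0 := hpos _ (by simp)
      have h1 : 0 < x1 := hpos _ (by simp)
      have h2 : 0 < x2 := hpos _ (by simp)
      simp at hv
      rcases hv with rfl | rfl | rfl | rfl | rfl <;> omega)
  · exact step xyzct h5 hpos

-- ===== VERDICT (by name: the statement is the Claim_ definition above) =====
theorem iter_blocks_spec : Claim_equal_iter_blocks := by
  intro xyzct block_size _hdom hpre
  unfold Spec_iter_blocks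
  exact final xyzct block_size hpre.1 hpre.2.1 hpre.2.2
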